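-- pv_equiv track=rewrite | github.com/NOAA-MDL/CAMPS | camps/libraries/mathlib/moisture.py | interval_retrieval_and_removal
-- ===== SOURCE A (Python) =====
-- def interval_retrieval_and_removal(array, time, index):
--     """
--     This function is called by interval_selection to present
--     time intervals that may work in calculating the total
--     precipitation.
--     """
--
--     nlists = len(array[:])
--     b = []
--     for i in range(nlists):
--         b = [x for x in array[i] if x[index] == time]
--         if b != []:
--             j = array[i].index(b[0])
--             return array[i].pop(j)
--     return b
-- ===== SOURCE B (Python) =====
-- def interval_retrieval_and_removal(array, time, index):
--     for sub in array:
--         for j, x in enumerate(sub):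
--             if x[index] == time:
--                 sub.pop(j)
--                 return x
--     return []
-- ===== Notes on version B (the rewrite author's own statement) =====
-- stated objective: simpler
-- what changed: Replaces A's per-sublist three-pass scheme (build a filtered list, then .index to re-find its head, then pop) with one early-exit scan that pops and returns the first matching element directly.
import Mathlib
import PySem

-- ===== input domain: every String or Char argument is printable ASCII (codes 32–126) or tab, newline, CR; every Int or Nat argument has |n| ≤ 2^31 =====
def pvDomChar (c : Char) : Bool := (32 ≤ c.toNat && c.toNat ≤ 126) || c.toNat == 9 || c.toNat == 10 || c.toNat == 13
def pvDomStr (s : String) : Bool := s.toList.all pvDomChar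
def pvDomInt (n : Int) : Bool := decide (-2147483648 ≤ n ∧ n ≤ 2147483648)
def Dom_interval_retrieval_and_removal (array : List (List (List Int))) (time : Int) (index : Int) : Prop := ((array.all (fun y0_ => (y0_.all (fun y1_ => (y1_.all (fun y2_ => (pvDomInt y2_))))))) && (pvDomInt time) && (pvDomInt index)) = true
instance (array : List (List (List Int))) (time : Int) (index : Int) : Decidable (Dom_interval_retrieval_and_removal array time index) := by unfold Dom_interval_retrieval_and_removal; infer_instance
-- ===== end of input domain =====

-- B changes only the decomposition (one early-exit scan instead of filter + .index + pop);
-- both programs also pop the returned element from its sublist in Python — the equivalence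
-- proved here is about the RETURN value (B performs the same mutation).

-- ===== PORT A =====
-- loop body for 'for i in range(nlists): b = [x for x in array[i] if x[index] == time]; …'
def pvAGo (time index : Int) : List (List (List Int)) → List Int
  | [] => []                                    -- loop ends: return b (= [])
  | sub :: rest =>
    let b := sub.filter (fun x => PySem.List.pyGet? x index == some time)
    if b ≠ [] then
      -- j = array[i].index(b[0]); return array[i].pop(j)
      match PySem.List.index? sub (PySem.List.pyGetD b 0 []) with
      | some j => ((PySem.List.pop? sub (j : Int)).map Prod.fst).getD []
      | none => []                              -- unreachable: b[0] ∈ array[i]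
    else pvAGo time index rest

def interval_retrieval_and_removal (array : List (List (List Int))) (time : Int) (index : Int) : List Int :=
  pvAGo time index array

-- ===== PORT B =====
-- inner loop: 'for j, x in enumerate(sub): if x[index] == time: sub.pop(j); return x'
def pvFindFirst (time index : Int) : List (List Int) → Option (List Int)
  | [] => none
  | x :: rest =>
    if PySem.List.pyGet? x index == some time then some x
    else pvFindFirst time index rest

def pvBGo (time index : Int) : List (List (List Int)) → List Int
  | [] => []
  | sub :: rest =>
    match pvFindFirst time index sub with
    | some x => x
    | none => pvBGo time index rest

def interval_retrieval_and_removal_alt (array : List (List (List Int))) (time : Int) (index : Int) : List Int :=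
  pvBGo time index array

-- ===== PRECONDITION & SPEC =====
-- pvPreScan is true exactly on the inputs where Python A returns: every sublist scanned
-- before (and including) the first one containing a match must have x[index] in range for
-- all its elements (otherwise the comprehension raises IndexError); sublists after the
-- first match are never scanned.
def pvPreScan (time index : Int) : List (List (List Int)) → Bool
  | [] => true
  | sub :: rest =>
    sub.all (fun x => decide (-(x.length : Int) ≤ index ∧ index < (x.length : Int))) &&
    (if sub.any (fun x => PySem.List.pyGet? x index == some time) then true
     else pvPreScan time index rest)

def Pre_interval_retrieval_and_removal (array : List (List (List Int))) (time : Int) (index : Int) : Prop :=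
  pvPreScan time index array = true
instance (array : List (List (List Int))) (time : Int) (index : Int) : Decidable (Pre_interval_retrieval_and_removal array time index) := by unfold Pre_interval_retrieval_and_removal; infer_instance

def pvWitness_interval_retrieval_and_removal : List (List (List Int)) × Int × Int :=
  ([[[1, 2], [3, 4]], [[5, 6]]], 3, 0)

def Spec_interval_retrieval_and_removal (array : List (List (List Int))) (time : Int) (index : Int) (out : List Int) : Prop := out = interval_retrieval_and_removal_alt array time index
instance (array : List (List (List Int))) (time : Int) (index : Int) (out : List Int) : Decidable (Spec_interval_retrieval_and_removal array time index out) := by unfold Spec_interval_retrieval_and_removal; infer_instance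

-- ===== CLAIM (what is proved, stated in full; the proofs are below) =====
def Claim_equal_interval_retrieval_and_removal : Prop := ∀ (array : List (List (List Int))) (time : Int) (index : Int), Dom_interval_retrieval_and_removal array time index → Pre_interval_retrieval_and_removal array time index → Spec_interval_retrieval_and_removal array time index (interval_retrieval_and_removal array time index)

-- ===== LEMMAS AND PROOFS =====

-- B's inner scan is the head of A's filtered list.
theorem pvFindFirst_eq_head?_filter (time index : Int) (sub : List (List Int)) :
    pvFindFirst time index sub =
      (sub.filter (fun x => PySem.List.pyGet? x index == some time)).head? := by
  induction sub with
  | nil => rfl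
  | cons x rest ih =>
    by_cases h : (PySem.List.pyGet? x index == some time) = true
    · simp [pvFindFirst, h]
    · simp [pvFindFirst, h, ih]

-- A's branch (index then pop) returns exactly the first matching element.
theorem pvAGo_cons_eq (time index : Int) (sub : List (List Int)) (rest : List (List (List Int)))
    (b0 : List Int) (t : List (List Int))
    (hb : sub.filter (fun x => PySem.List.pyGet? x index == some time) = b0 :: t) :
    pvAGo time index (sub :: rest) = b0 := by
  have hmem : b0 ∈ sub := by
    have : b0 ∈ sub.filter (fun x => PySem.List.pyGet? x index == some time) := by
      rw [hb]; exact List.mem_cons_self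
    exact List.mem_of_mem_filter this
  have hidx : (PySem.List.index? sub b0).isSome := (PySem.List.index?_isSome_iff sub b0).2 hmem
  obtain ⟨j, hj⟩ := Option.isSome_iff_exists.mp hidx
  obtain ⟨hk, hget, -⟩ := PySem.List.getElem_of_index?_eq_some hj
  have hj' : List.idxOf? b0 sub = some j := by
    rw [← PySem.List.index?_eq_idxOf?]; exact hj
  simp [pvAGo, hb, hj', PySem.List.pop?_natCast sub j hk, hget]

theorem pvAGo_eq_pvBGo (time index : Int) (array : List (List (List Int))) :
    pvAGo time index array = pvBGo time index array := by
  induction array with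
  | nil => rfl
  | cons sub rest ih =>
    cases hb : sub.filter (fun x => PySem.List.pyGet? x index == some time) with
    | nil =>
      simp only [pvAGo, pvBGo, hb, pvFindFirst_eq_head?_filter, List.head?_nil]
      simpa using ih
    | cons b0 t =>
      rw [pvAGo_cons_eq time index sub rest b0 t hb]
      simp [pvBGo, pvFindFirst_eq_head?_filter, hb]

-- ===== VERDICT (by name: the statement is the Claim_ definition above) =====
theorem interval_retrieval_and_removal_spec : Claim_equal_interval_retrieval_and_removal := by
  intro array time index _ _
  unfold Spec_interval_retrieval_and_removal interval_retrieval_and_removal interval_retrieval_and_removal_alt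
  exact pvAGo_eq_pvBGo time index array
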